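-- pv_equiv track=rewrite | github.com/pc5401/my_BOJ | 백준/Silver/1283. 단축키 지정/단축키 지정.py | solve
-- ===== SOURCE A (Python) =====
-- def anser(order: str, idx: int) -> str:
--     rtn = ''
--
--     for i, word in enumerate(order):
--
--         if i == idx:
--             rtn += f'[{word}]'
--         else:
--             rtn += word
--     return rtn
--
-- def solve(order: str, options: set) -> str:
--
--     if order[0] != ' ' and not order[0].upper() in options:
--         options.add(order[0].upper())
--         return anser(order, 0)
--
--     for i in range(1, len(order)):
--         if order[i-1] == ' ' and not order[i].upper() in options:
--             options.add(order[i].upper())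
--             return anser(order, i)
--
--     for i in range(1, len(order)):
--         if order[i] != ' ' and not order[i].upper() in options:
--             options.add(order[i].upper())
--             return anser(order, i)
--     return order
-- ===== SOURCE B (Python) =====
-- def solve(order: str, options: set) -> str:
--     # single combined scan: track first eligible word-start and first eligible non-space char
--     ws = fb = None
--     prev = None
--     for i, c in enumerate(order):
--         if c.upper() not in options:
--             if (c != ' ') if prev is None else (prev == ' '):
--                 if ws is None:
--                     ws = i
--             if prev is not None and c != ' ' and fb is None:
--                 fb = i
--         prev = c
--     idx = ws if ws is not None else fb
--     if idx is None:
--         return order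
--     options.add(order[idx].upper())
--     return order[:idx] + '[' + order[idx] + ']' + order[idx + 1:]
-- ===== Notes on version B (the rewrite author's own statement) =====
-- stated objective: alternative
-- what changed: A's head check plus two sequential range(1,len) loops (word-start pass, then any-non-space pass) are replaced by one combined scan over enumerate(order) that records the first eligible word-start index and the first eligible non-space index, picks the winner afterwards, and brackets it by slicing instead of rebuilding the string char-by-char.
import Mathlib
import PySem

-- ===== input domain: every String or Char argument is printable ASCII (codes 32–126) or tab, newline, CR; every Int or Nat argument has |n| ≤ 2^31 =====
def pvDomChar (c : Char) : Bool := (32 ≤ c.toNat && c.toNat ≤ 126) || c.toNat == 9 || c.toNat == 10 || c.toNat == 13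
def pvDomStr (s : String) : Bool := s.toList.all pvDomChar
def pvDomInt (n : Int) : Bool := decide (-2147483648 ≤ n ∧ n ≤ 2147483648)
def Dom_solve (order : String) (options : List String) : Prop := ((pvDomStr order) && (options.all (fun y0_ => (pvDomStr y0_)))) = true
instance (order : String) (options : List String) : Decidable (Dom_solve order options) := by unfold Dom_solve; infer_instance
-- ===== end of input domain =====

-- B replaces A's three sequential scans (head check + two range loops, each re-indexing the
-- string) by ONE combined pass that records the first eligible word-start and the first
-- eligible non-space character, then brackets the winner by slicing (alternative decomposition;
-- same asymptotic cost). Return-value equivalence only: both Pythons also add the chosen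
-- character's uppercase to the mutable `options` set (B mirrors that side effect in Source B).


-- ===== PORT A =====
-- order[i].upper() on the 1-char string order[i]
def upC (c : Char) : String := PySem.Str.upper (String.ofList [c])

-- the for-loop of `anser`, carrying rtn (as a char list; joined to a String at the end)
def anserGo (idx : Int) : List (Int × Char) → List Char → List Char
  | [], rtn => rtn
  | (i, w) :: rest, rtn => anserGo idx rest (rtn ++ (if i = idx then ['[', w, ']'] else [w]))

def anser (order : String) (idx : Int) : String :=
  String.ofList (anserGo idx (PySem.List.enumerate order.toList 0) [])

-- first for-loop of solve (early return = some i)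
def loopA1 (cs : List Char) (options : List String) : List Int → Option Int
  | [] => none
  | i :: rest =>
    if PySem.List.pyGetD cs (i - 1) ' ' = ' ' ∧ upC (PySem.List.pyGetD cs i ' ') ∉ options
    then some i else loopA1 cs options rest

-- second for-loop of solve
def loopA2 (cs : List Char) (options : List String) : List Int → Option Int
  | [] => none
  | i :: rest =>
    if PySem.List.pyGetD cs i ' ' ≠ ' ' ∧ upC (PySem.List.pyGetD cs i ' ') ∉ options
    then some i else loopA2 cs options rest

def solve (order : String) (options : List String) : String :=
  if PySem.List.pyGetD order.toList 0 ' ' ≠ ' ' ∧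
      upC (PySem.List.pyGetD order.toList 0 ' ') ∉ options then
    anser order 0
  else
    match loopA1 order.toList options (PySem.List.pyRange 1 order.toList.length 1) with
    | some i => anser order i
    | none =>
      match loopA2 order.toList options (PySem.List.pyRange 1 order.toList.length 1) with
      | some i => anser order i
      | none => order

-- ===== PORT B =====
-- `(c != ' ') if prev is None else (prev == ' ')`
def wordStart : Option Char → Char → Bool
  | none, c => c != ' '
  | some p, _ => p == ' '

-- the single combined scan of Source B, carrying (prev, ws, fb)
def scanGo (options : List String) :
    List (Int × Char) → Option Char → Option Int → Option Int → Option Int × Option Int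
  | [], _, ws, fb => (ws, fb)
  | (i, c) :: rest, prev, ws, fb =>
    if upC c ∈ options then scanGo options rest (some c) ws fb
    else
      scanGo options rest (some c)
        (if wordStart prev c ∧ ws = none then some i else ws)
        (if prev ≠ none ∧ c ≠ ' ' ∧ fb = none then some i else fb)

-- `idx = ws if ws is not None else fb`
def pickIdx : Option Int × Option Int → Option Int
  | (some i, _) => some i
  | (none, fb) => fb

def solve_alt (order : String) (options : List String) : String :=
  match pickIdx (scanGo options (PySem.List.enumerate order.toList 0) none none none) with
  | none => order
  | some i =>
    String.ofList (order.toList.take i.toNat ++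
      '[' :: PySem.List.pyGetD order.toList i ' ' :: ']' :: order.toList.drop (i.toNat + 1))

-- ===== PRECONDITION & SPEC =====
-- Pre_ excludes only the empty string, on which the Python A raises IndexError (order[0]).
def Pre_solve (order : String) (options : List String) : Prop := order ≠ ""
instance (order : String) (options : List String) : Decidable (Pre_solve order options) := by
  unfold Pre_solve; infer_instance
def pvWitness_solve : String × List String := ("ab c", ["A"])

def Spec_solve (order : String) (options : List String) (out : String) : Prop := out = solve_alt order options
instance (order : String) (options : List String) (out : String) : Decidable (Spec_solve order options out) := by unfold Spec_solve; infer_instance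

-- ===== CLAIM (what is proved, stated in full; the proofs are below) =====
def Claim_equal_solve : Prop := ∀ (order : String) (options : List String), Dom_solve order options → Pre_solve order options → Spec_solve order options (solve order options)

-- ===== LEMMAS AND PROOFS =====

-- first index (relative) of an eligible word start, given the previous char (none = string start)
def fWS (opts : List String) : Option Char → List Char → Option Nat
  | _, [] => none
  | none, c :: rest =>
    if upC c ∉ opts ∧ c ≠ ' ' then some 0 else (fWS opts (some c) rest).map (· + 1)
  | some p, c :: rest =>
    if upC c ∉ opts ∧ p = ' ' then some 0 else (fWS opts (some c) rest).map (· + 1)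

-- first index (relative) of an eligible non-space char, `first = true` meaning position 0 is barred
def fFB (opts : List String) : Bool → List Char → Option Nat
  | _, [] => none
  | first, c :: rest =>
    if upC c ∉ opts ∧ first = false ∧ c ≠ ' ' then some 0 else (fFB opts false rest).map (· + 1)

theorem fWS_lt {opts : List String} {prev : Option Char} {cs : List Char} {k : Nat}
    (h : fWS opts prev cs = some k) : k < cs.length := by
  induction cs generalizing prev k with
  | nil => cases prev <;> simp [fWS] at h
  | cons c rest ih =>
    cases prev <;> simp only [fWS] at h <;> split at h <;>
      first
      | (simp_all; omega)
      | (obtain ⟨m, hm, rfl⟩ := Option.map_eq_some_iff.mp h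
         have := ih hm; simp; omega)

theorem fFB_lt {opts : List String} {first : Bool} {cs : List Char} {k : Nat}
    (h : fFB opts first cs = some k) : k < cs.length := by
  induction cs generalizing first k with
  | nil => simp [fFB] at h
  | cons c rest ih =>
    simp only [fFB] at h; split at h
    · simp_all; omega
    · obtain ⟨m, hm, rfl⟩ := Option.map_eq_some_iff.mp h
      have := ih hm; simp; omega

theorem scanGo_eq (opts : List String) (cs : List Char) (s : Int) (prev : Option Char)
    (ws fb : Option Int) :
    scanGo opts (PySem.List.enumerate cs s) prev ws fb =
      ((match ws with
        | some a => some a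
        | none => (fWS opts prev cs).map (fun k : Nat => s + (k : Int))),
       (match fb with
        | some a => some a
        | none => (fFB opts prev.isNone cs).map (fun k : Nat => s + (k : Int)))) := by
  induction cs generalizing s prev ws fb with
  | nil =>
    cases prev <;> cases ws <;> cases fb <;>
      simp [PySem.List.enumerate_nil, scanGo, fWS, fFB]
  | cons c rest ih =>
    rw [PySem.List.enumerate_cons]
    cases prev with
    | none =>
      by_cases hin : upC c ∈ opts
      · simp only [scanGo]
        rw [if_pos hin, ih]
        cases ws <;> cases fb <;>
          cases hW : fWS opts (some c) rest <;> cases hF : fFB opts false rest <;>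
            simp [fWS, fFB, hin, hW, hF] <;> omega
      · simp only [scanGo]
        rw [if_neg hin, ih]
        cases ws <;> cases fb <;>
          cases hW : fWS opts (some c) rest <;> cases hF : fFB opts false rest <;>
            by_cases hc : c = ' '
        all_goals try subst hc
        all_goals try simp_all [fWS, fFB, wordStart]
        all_goals omega
    | some p =>
      by_cases hin : upC c ∈ opts
      · simp only [scanGo]
        rw [if_pos hin, ih]
        cases ws <;> cases fb <;>
          cases hW : fWS opts (some c) rest <;> cases hF : fFB opts false rest <;>
            simp [fWS, fFB, hin, hW, hF] <;> omega
      · simp only [scanGo]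
        rw [if_neg hin, ih]
        cases ws <;> cases fb <;>
          cases hW : fWS opts (some c) rest <;> cases hF : fFB opts false rest <;>
            by_cases hp : p = ' ' <;> by_cases hc : c = ' '
        all_goals try subst hp
        all_goals try subst hc
        all_goals try simp_all [fWS, fFB, wordStart]
        all_goals omega

theorem loopA1_eq (cs : List Char) (opts : List String) (j : Nat) (h1 : 1 ≤ j)
    (h2 : j ≤ cs.length) :
    loopA1 cs opts (PySem.List.pyRange (j : Int) (cs.length : Int) 1) =
      (fWS opts (some (cs.getD (j - 1) ' ')) (cs.drop j)).map (fun k => ((j + k : Nat) : Int)) := by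
  obtain ⟨n, hn⟩ : ∃ n, cs.length - j = n := ⟨_, rfl⟩
  induction n generalizing j with
  | zero =>
    have hj : j = cs.length := by omega
    subst hj
    rw [show PySem.List.pyRange (cs.length : Int) (cs.length : Int) 1 = [] from by
      simp [PySem.List.pyRange]]
    simp [loopA1, List.drop_length, fWS]
  | succ n ihn =>
    have hj : j < cs.length := by omega
    rw [PySem.List.pyRange_one_cons (by exact_mod_cast hj)]
    have e1 : ((j : Int)) - 1 = ((j - 1 : Nat) : Int) := by omega
    rw [loopA1, e1, PySem.List.pyGetD_natCast, PySem.List.pyGetD_natCast,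
      List.drop_eq_getElem_cons hj, List.getD_eq_getElem cs ' ' hj]
    have hrec : loopA1 cs opts (PySem.List.pyRange ((j : Int) + 1) (cs.length : Int) 1) =
        ((fWS opts (some cs[j]) (cs.drop (j + 1))).map (· + 1)).map
          (fun k => ((j + k : Nat) : Int)) := by
      have e2 : ((j : Int)) + 1 = ((j + 1 : Nat) : Int) := by omega
      rw [e2, ihn (j + 1) (by omega) (by omega) (by omega)]
      have e3 : cs.getD (j + 1 - 1) ' ' = cs[j] := by
        simpa using List.getD_eq_getElem cs ' ' hj
      rw [e3, Option.map_map]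
      cases fWS opts (some cs[j]) (cs.drop (j + 1)) <;> simp <;> omega
    simp only [fWS]
    by_cases h1 : cs.getD (j - 1) ' ' = ' '
    · by_cases h2 : upC cs[j] ∈ opts
      · rw [if_neg (fun hc => hc.2 h2), if_neg (fun hc => hc.1 h2)]
        exact hrec
      · rw [if_pos ⟨h1, h2⟩, if_pos ⟨h2, h1⟩]
        simp
    · rw [if_neg (fun hc => h1 hc.1), if_neg (fun hc => h1 hc.2)]
      exact hrec

theorem loopA2_eq (cs : List Char) (opts : List String) (j : Nat) (h2 : j ≤ cs.length) :
    loopA2 cs opts (PySem.List.pyRange (j : Int) (cs.length : Int) 1) =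
      (fFB opts false (cs.drop j)).map (fun k => ((j + k : Nat) : Int)) := by
  obtain ⟨n, hn⟩ : ∃ n, cs.length - j = n := ⟨_, rfl⟩
  induction n generalizing j with
  | zero =>
    have hj : j = cs.length := by omega
    subst hj
    rw [show PySem.List.pyRange (cs.length : Int) (cs.length : Int) 1 = [] from by
      simp [PySem.List.pyRange]]
    simp [loopA2, List.drop_length, fFB]
  | succ n ihn =>
    have hj : j < cs.length := by omega
    rw [PySem.List.pyRange_one_cons (by exact_mod_cast hj)]
    rw [loopA2, PySem.List.pyGetD_natCast, List.drop_eq_getElem_cons hj,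
      List.getD_eq_getElem cs ' ' hj]
    have hrec : loopA2 cs opts (PySem.List.pyRange ((j : Int) + 1) (cs.length : Int) 1) =
        ((fFB opts false (cs.drop (j + 1))).map (· + 1)).map
          (fun k => ((j + k : Nat) : Int)) := by
      have e2 : ((j : Int)) + 1 = ((j + 1 : Nat) : Int) := by omega
      rw [e2, ihn (j + 1) (by omega) (by omega), Option.map_map]
      cases fFB opts false (cs.drop (j + 1)) <;> simp <;> omega
    simp only [fFB]
    by_cases h1 : cs[j] = ' '
    · rw [if_neg (fun hc => hc.1 h1), if_neg (fun hc => hc.2.2 h1)]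
      exact hrec
    · by_cases h2 : upC cs[j] ∈ opts
      · rw [if_neg (fun hc => hc.2 h2), if_neg (fun hc => hc.1 h2)]
        exact hrec
      · rw [if_pos ⟨h1, h2⟩, if_pos ⟨h2, trivial, h1⟩]
        simp

theorem loopA1_eq_one (c0 : Char) (rest : List Char) (opts : List String) :
    loopA1 (c0 :: rest) opts (PySem.List.pyRange 1 (((c0 :: rest).length : Nat) : Int) 1) =
      (fWS opts (some c0) rest).map (fun k : Nat => 1 + (k : Int)) := by
  have h := loopA1_eq (c0 :: rest) opts 1 le_rfl (by simp)
  simpa [List.drop_one] using h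

theorem loopA2_eq_one (c0 : Char) (rest : List Char) (opts : List String) :
    loopA2 (c0 :: rest) opts (PySem.List.pyRange 1 (((c0 :: rest).length : Nat) : Int) 1) =
      (fFB opts false rest).map (fun k : Nat => 1 + (k : Int)) := by
  have h := loopA2_eq (c0 :: rest) opts 1 (by simp)
  simpa [List.drop_one] using h

theorem anserGo_miss (idx : Int) (cs : List Char) (s : Int) (acc : List Char) (h : idx < s) :
    anserGo idx (PySem.List.enumerate cs s) acc = acc ++ cs := by
  induction cs generalizing s acc with
  | nil => simp [PySem.List.enumerate_nil, anserGo]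
  | cons c rest ih =>
    rw [PySem.List.enumerate_cons, anserGo, if_neg (by omega)]
    rw [ih (s + 1) _ (by omega)]
    simp

theorem anserGo_hit (cs : List Char) (s : Int) (k : Nat) (acc : List Char) (h : k < cs.length) :
    anserGo (s + (k : Int)) (PySem.List.enumerate cs s) acc =
      acc ++ cs.take k ++ '[' :: cs[k] :: ']' :: cs.drop (k + 1) := by
  induction cs generalizing s k acc with
  | nil => simp at h
  | cons c rest ih =>
    cases k with
    | zero =>
      rw [PySem.List.enumerate_cons, anserGo, if_pos (by simp)]
      rw [anserGo_miss (s + (0 : Nat)) rest (s + 1) _ (by omega)]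
      simp
    | succ k' =>
      rw [PySem.List.enumerate_cons, anserGo, if_neg (by omega)]
      have e : s + ((k' + 1 : Nat) : Int) = (s + 1) + (k' : Int) := by push_cast; ring
      rw [e, ih (s + 1) k' _ (by simpa using Nat.lt_of_succ_lt_succ h)]
      simp

-- the common rendering of both ports at a hit index k
theorem anser_eq_bracket (order : String) (k : Nat) (h : k < order.toList.length) :
    anser order (k : Int) =
      String.ofList (order.toList.take k ++ '[' :: order.toList[k] :: ']' :: order.toList.drop (k + 1)) := by
  unfold anser
  rw [show ((k : Nat) : Int) = 0 + (k : Int) from (by omega),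
    anserGo_hit order.toList 0 k [] h, List.nil_append]

-- B's rendering at a hit index equals `anser` at that index
theorem render_eq (order : String) (i : Int) (k : Nat) (hik : i = (k : Int))
    (h : k < order.toList.length) :
    String.ofList (order.toList.take i.toNat ++
        '[' :: PySem.List.pyGetD order.toList i ' ' :: ']' ::
        order.toList.drop (i.toNat + 1)) =
      anser order i := by
  subst hik
  rw [anser_eq_bracket order k h]
  have hg : PySem.List.pyGetD order.toList ((k : Nat) : Int) ' ' = order.toList[k] := by
    rw [PySem.List.pyGetD_natCast]
    exact List.getD_eq_getElem _ ' ' h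
  simp [hg]

-- A reduced to the common search functions
theorem solveA_char (order : String) (options : List String) (c0 : Char) (rest : List Char)
    (hcs : order.toList = c0 :: rest) :
    solve order options =
      match fWS options none (c0 :: rest) with
      | some k => anser order (k : Int)
      | none =>
        match fFB options true (c0 :: rest) with
        | some k => anser order (k : Int)
        | none => order := by
  unfold solve
  simp only [hcs, PySem.List.pyGetD_zero_cons, loopA1_eq_one, loopA2_eq_one]
  by_cases h0 : upC c0 ∈ options
  · rw [if_neg (fun hc => hc.2 h0)]
    simp only [fWS, fFB, Bool.true_eq_false, false_and, and_false, if_false, ite_false]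
    rw [if_neg (fun hc => hc.1 h0)]
    rcases hw : fWS options (some c0) rest with _ | k
    · simp only [Option.map_none]
      rcases hf : fFB options false rest with _ | m
      · simp
      · simp only [Option.map_some]
        congr 1
        push_cast
        ring
    · simp only [Option.map_some]
      congr 1
      push_cast
      ring
  · by_cases hsp : c0 = ' '
    · rw [if_neg (fun hc => hc.1 hsp)]
      simp only [fWS, fFB, Bool.true_eq_false, false_and, and_false, if_false, ite_false]
      rw [if_neg (fun hc => hc.2 hsp)]
      rcases hw : fWS options (some c0) rest with _ | k
      · simp only [Option.map_none]
        rcases hf : fFB options false rest with _ | m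
        · simp
        · simp only [Option.map_some]
          congr 1
          push_cast
          ring
      · simp only [Option.map_some]
        congr 1
        push_cast
        ring
    · rw [if_pos ⟨hsp, h0⟩]
      simp only [fWS]
      rw [if_pos ⟨h0, hsp⟩]
      simp

-- B reduced to the same search functions
theorem solveB_char (order : String) (options : List String) (c0 : Char) (rest : List Char)
    (hcs : order.toList = c0 :: rest) :
    solve_alt order options =
      match fWS options none (c0 :: rest) with
      | some k => anser order (k : Int)
      | none =>
        match fFB options true (c0 :: rest) with
        | some k => anser order (k : Int)
        | none => order := by
  unfold solve_alt
  rw [scanGo_eq]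
  simp only [hcs, Option.isNone_none, zero_add]
  rcases hw : fWS options none (c0 :: rest) with _ | k
  · rcases hf : fFB options true (c0 :: rest) with _ | m
    · simp [pickIdx]
    · have hm : m < order.toList.length := by rw [hcs]; exact fFB_lt hf
      simp only [Option.map_some, Option.map_none, pickIdx]
      rw [← hcs]
      exact render_eq order (m : Int) m rfl hm
  · have hk : k < order.toList.length := by rw [hcs]; exact fWS_lt hw
    simp only [Option.map_some, pickIdx]
    rw [← hcs]
    exact render_eq order (k : Int) k rfl hk

-- ===== VERDICT (by name: the statement is the Claim_ definition above) =====
theorem solve_spec : Claim_equal_solve := by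
  intro order options _ hpre
  unfold Spec_solve
  have hne : order.toList ≠ [] := by
    intro hn
    apply hpre
    have := congrArg String.ofList hn
    simpa using this
  obtain ⟨c0, rest, hcs⟩ := List.exists_cons_of_ne_nil hne
  rw [solveA_char order options c0 rest hcs, solveB_char order options c0 rest hcs]
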